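-- pv_equiv track=rewrite | github.com/JaiKansal/resume-jd-analyze | resume_matcher_ai/main.py | _is_retryable_error
-- ===== SOURCE A (Python) =====
-- def _is_retryable_error(error_msg: str) -> bool:
--     """
--     Determine if an error is retryable based on the error message
--
--     Args:
--         error_msg: The error message to analyze
--
--     Returns:
--         True if the error is retryable, False otherwise
--     """
--     error_lower = error_msg.lower()
--
--     # Retryable errors (usually temporary issues)
--     retryable_indicators = [
--         'timeout', 'timed out', 'connection', 'network', 'temporary',
--         'rate limit', 'server error', 'service unavailable', 'bad gateway',
--         'gateway timeout', 'internal server error', '500', '502', '503', '504',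
--         'failed to connect', 'connection refused', 'connection reset',
--         'read timeout', 'ssl', 'certificate'
--     ]
--
--     # Non-retryable errors (usually configuration or input issues)
--     non_retryable_indicators = [
--         'api key', 'unauthorized', '401', 'forbidden', '403',
--         'invalid', 'corrupted', 'not found', 'permission',
--         'file not found', 'directory', 'empty', 'too short',
--         'doesn\'t appear to be', 'malformed', 'bad request', '400'
--     ]
--
--     # Check for non-retryable errors first (these take precedence)
--     for indicator in non_retryable_indicators:
--         if indicator in error_lower:
--             return False
--
--     # Check for retryable errors
--     for indicator in retryable_indicators:
--         if indicator in error_lower: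
--             return True
--
--     # Default to retryable for unknown errors (conservative approach)
--     return True
-- ===== SOURCE B (Python) =====
-- def _is_retryable_error(error_msg: str) -> bool:
--     """Position-major scan: walk the lowered message once; at each position
--     test whether any non-retryable indicator starts there.  (The retryable
--     list in the original is dead code: every path without a non-retryable
--     match returns True.)"""
--     non_retryable_indicators = [
--         'api key', 'unauthorized', '401', 'forbidden', '403',
--         'invalid', 'corrupted', 'not found', 'permission',
--         'file not found', 'directory', 'empty', 'too short',
--         'doesn\'t appear to be', 'malformed', 'bad request', '400'
--     ]
--     s = error_msg.lower()
--     for i in range(len(s) + 1):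
--         for ind in non_retryable_indicators:
--             if s.startswith(ind, i):
--                 return False
--     return True
-- ===== Notes on version B (the rewrite author's own statement) =====
-- stated objective: alternative
-- what changed: Replaces A's indicator-major double scan (substring containment per indicator, plus a dead 21-entry retryable list) with a position-major walk over the lowered message testing at each position whether any non-retryable indicator starts there; same O(n*k) work, traded for explicit per-position prefix tests instead of library containment.
import Mathlib
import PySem

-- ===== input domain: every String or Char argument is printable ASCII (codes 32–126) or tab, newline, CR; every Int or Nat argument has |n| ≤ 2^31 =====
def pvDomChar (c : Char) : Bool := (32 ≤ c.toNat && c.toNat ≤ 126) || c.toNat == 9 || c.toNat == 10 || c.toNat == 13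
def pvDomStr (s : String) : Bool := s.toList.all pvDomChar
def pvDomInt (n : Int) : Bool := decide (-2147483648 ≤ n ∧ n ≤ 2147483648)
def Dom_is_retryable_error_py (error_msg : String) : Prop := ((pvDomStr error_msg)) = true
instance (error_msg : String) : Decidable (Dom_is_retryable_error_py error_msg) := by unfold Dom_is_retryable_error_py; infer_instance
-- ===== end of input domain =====

-- B walks the lowered message position by position, testing at each position whether any
-- non-retryable indicator starts there, instead of A's indicator-major containment scans
-- (A's retryable list is dead code: every path past the non-retryable scan returns True).

-- ===== PORT A =====
def pvRetryableList : List String :=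
  ["timeout", "timed out", "connection", "network", "temporary",
   "rate limit", "server error", "service unavailable", "bad gateway",
   "gateway timeout", "internal server error", "500", "502", "503", "504",
   "failed to connect", "connection refused", "connection reset",
   "read timeout", "ssl", "certificate"]

def pvNonRetryableList : List String :=
  ["api key", "unauthorized", "401", "forbidden", "403",
   "invalid", "corrupted", "not found", "permission",
   "file not found", "directory", "empty", "too short",
   "doesn't appear to be", "malformed", "bad request", "400"]

-- second loop of A: scan the retryable list, return True on a match, default True
def pvLoopRetry (el : String) : List String → Bool
  | [] => true
  | i :: rest => if PySem.Str.isIn i el then true else pvLoopRetry el rest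

-- first loop of A: scan the non-retryable list, return False on a match, else fall through
def pvLoopNonRetry (el : String) : List String → Bool
  | [] => pvLoopRetry el pvRetryableList
  | i :: rest => if PySem.Str.isIn i el then false else pvLoopNonRetry el rest

def is_retryable_error_py (error_msg : String) : Bool :=
  pvLoopNonRetry (PySem.Str.lower error_msg) pvNonRetryableList

-- ===== PORT B =====
-- Source B's outer loop `for i in range(len(s)+1)` over start positions, realised as a
-- recursion over the suffixes s[i:]; `s.startswith(ind, i)` is a prefix test on s[i:].
def pvScanPos (inds : List (List Char)) : List Char → Bool
  | [] => inds.any (fun p => PySem.Chars.startswith ([] : List Char) p)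
  | c :: rest =>
      if inds.any (fun p => PySem.Chars.startswith (c :: rest) p) then true
      else pvScanPos inds rest

def is_retryable_error_py_alt (error_msg : String) : Bool :=
  !(pvScanPos (pvNonRetryableList.map String.toList) (PySem.Str.lower error_msg).toList)

-- ===== PRECONDITION & SPEC =====
def Spec_is_retryable_error_py (error_msg : String) (out : Bool) : Prop := out = is_retryable_error_py_alt error_msg
instance (error_msg : String) (out : Bool) : Decidable (Spec_is_retryable_error_py error_msg out) := by unfold Spec_is_retryable_error_py; infer_instance

-- ===== CLAIM (what is proved, stated in full; the proofs are below) =====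
def Claim_equal_is_retryable_error_py : Prop := ∀ (error_msg : String), Dom_is_retryable_error_py error_msg → Spec_is_retryable_error_py error_msg (is_retryable_error_py error_msg)

-- ===== LEMMAS AND PROOFS =====
-- A's retryable scan returns True on every path (the list is dead code)
theorem pvLoopRetry_true (el : String) (l : List String) : pvLoopRetry el l = true := by
  induction l with
  | nil => rfl
  | cons i rest ih => simp [pvLoopRetry, ih]

-- A's non-retryable scan is the negated `any` of containment tests
theorem pvLoopNonRetry_eq (el : String) (l : List String) :
    pvLoopNonRetry el l = !(l.any (fun i => PySem.Str.isIn i el)) := by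
  induction l with
  | nil => simp [pvLoopNonRetry, pvLoopRetry_true]
  | cons i rest ih =>
    simp only [pvLoopNonRetry, List.any_cons]
    rw [ih]
    simp

-- B's position-major scan finds exactly the indicators occurring as an infix
theorem pvScanPos_iff (inds : List (List Char)) (l : List Char) :
    pvScanPos inds l = true ↔ ∃ p ∈ inds, p <:+: l := by
  induction l with
  | nil =>
    simp [pvScanPos, PySem.Chars.startswith_iff, List.prefix_nil, List.infix_nil]
  | cons c rest ih =>
    simp only [pvScanPos]
    split_ifs with h
    · simp only [List.any_eq_true, PySem.Chars.startswith_iff] at h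
      obtain ⟨p, hp, hpre⟩ := h
      exact iff_of_true rfl ⟨p, hp, hpre.isInfix⟩
    · simp only [List.any_eq_true, PySem.Chars.startswith_iff] at h
      push Not at h
      rw [ih]
      constructor
      · rintro ⟨p, hp, hinf⟩; exact ⟨p, hp, hinf.trans (List.suffix_cons c rest).isInfix⟩
      · rintro ⟨p, hp, hinf⟩
        rcases List.infix_cons_iff.mp hinf with hpre | hinf'
        · exact absurd hpre (h p hp)
        · exact ⟨p, hp, hinf'⟩

-- the two searches agree: both detect "some non-retryable indicator is a substring"
theorem pvAny_eq (el : String) (l : List String) :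
    l.any (fun i => PySem.Str.isIn i el) = pvScanPos (l.map String.toList) el.toList := by
  rcases Bool.eq_false_or_eq_true (pvScanPos (l.map String.toList) el.toList) with h | h
  swap
  · rw [h]
    rw [← Bool.not_eq_true] at h
    rw [pvScanPos_iff] at h
    push Not at h
    simp only [List.any_eq_false]
    intro i hi
    intro hc
    exact h i.toList (List.mem_map_of_mem hi) ((PySem.Str.isIn_iff_infix _ _).mp hc)
  · rw [h]
    rw [pvScanPos_iff] at h
    obtain ⟨p, hp, hinf⟩ := h
    obtain ⟨i, hi, rfl⟩ := List.mem_map.mp hp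
    simp only [List.any_eq_true]
    exact ⟨i, hi, (PySem.Str.isIn_iff_infix _ _).mpr hinf⟩

-- ===== VERDICT (by name: the statement is the Claim_ definition above) =====
theorem is_retryable_error_py_spec : Claim_equal_is_retryable_error_py := by
  intro e _
  unfold Spec_is_retryable_error_py is_retryable_error_py is_retryable_error_py_alt
  rw [pvLoopNonRetry_eq, pvAny_eq]
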